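-- pv_equiv track=rewrite | github.com/Swixixle/Sweeps_Intel | src/intel/infra_denylist.py | is_noise_mx
-- ===== SOURCE A (Python) =====
-- NOISE_MX_SUFFIXES: frozenset[str] = frozenset({
--     "google.com",
--     "googlemail.com",
--     "outlook.com",
--     "mail.protection.outlook.com",
-- })
--
-- def _suffix_matches(host: str, suffix: str) -> bool:
--     return host == suffix or host.endswith("." + suffix)
--
-- def is_noise_mx(host: str) -> bool:
--     """Return True if this MX host matches any denylist entry."""
--     host_lower = (host or "").lower().strip().rstrip(".")
--     if not host_lower:
--         return False
--     for suffix in NOISE_MX_SUFFIXES: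
--         if _suffix_matches(host_lower, suffix):
--             return True
--     return False
-- ===== SOURCE B (Python) =====
-- NOISE_MX_SUFFIXES: frozenset[str] = frozenset({
--     "google.com",
--     "googlemail.com",
--     "outlook.com",
--     "mail.protection.outlook.com",
-- })
--
-- def is_noise_mx(host: str) -> bool:
--     """Return True if this MX host matches any denylist entry."""
--     h = (host or "").lower().strip().rstrip(".")
--     if not h:
--         return False
--     # Enumerate the host's own dot-suffixes (plus the whole host) and
--     # check membership in the denylist set, instead of scanning the denylist.
--     candidates = [h] + [h[i + 1:] for i in range(len(h)) if h[i] == "."]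
--     return any(c in NOISE_MX_SUFFIXES for c in candidates)
-- ===== Notes on version B (the rewrite author's own statement) =====
-- stated objective: idiomatic
-- what changed: B inverts the traversal: instead of scanning the denylist and testing each suffix against the host, it enumerates the host's own dot-suffixes (the whole host plus the tail after every '.') and tests set membership of each candidate.
import Mathlib
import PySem

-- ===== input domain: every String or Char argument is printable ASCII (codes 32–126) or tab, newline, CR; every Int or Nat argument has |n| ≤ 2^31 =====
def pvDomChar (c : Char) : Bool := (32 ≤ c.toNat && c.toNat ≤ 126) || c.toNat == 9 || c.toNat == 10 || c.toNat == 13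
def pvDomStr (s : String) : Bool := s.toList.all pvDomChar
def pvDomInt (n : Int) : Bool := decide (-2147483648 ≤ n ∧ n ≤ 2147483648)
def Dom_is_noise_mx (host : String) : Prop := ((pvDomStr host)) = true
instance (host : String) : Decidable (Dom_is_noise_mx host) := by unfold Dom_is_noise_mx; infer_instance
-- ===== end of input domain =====

-- B inverts the traversal: instead of scanning the denylist for a matching suffix,
-- it enumerates the host's own dot-suffixes and tests set membership (more idiomatic; same cost on this tiny set).


-- the module constant NOISE_MX_SUFFIXES (a 4-element frozenset; order is irrelevant to both programs' Bool results)
def pvNoiseSuffixes : List String :=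
  ["google.com", "googlemail.com", "outlook.com", "mail.protection.outlook.com"]

-- shared normalisation line of both Pythons: (host or "").lower().strip().rstrip(".")
-- rstrip(".") is exactly: drop trailing '.' characters (dropWhile on the reverse)
def pvNormHost (host : String) : List Char :=
  ((PySem.Chars.strip (PySem.Chars.lower host.toList)).reverse.dropWhile (· == '.')).reverse

-- ===== PORT A =====
def suffix_matches (host suffix : List Char) : Bool :=
  host == suffix || PySem.Chars.endswith host ('.' :: suffix)

def is_noise_mx (host : String) : Bool :=
  let host_lower := pvNormHost host
  if host_lower = [] then false
  else pvNoiseSuffixes.any (fun s => suffix_matches host_lower s.toList)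

-- ===== PORT B =====
-- range(len(h)) over Nat indices is List.range h.length (exact: indices are nonnegative);
-- h[i] with 0 ≤ i < len h is h[i]?; h[i+1:] is h.drop (i+1) (exact for nonnegative in-range bounds)
def is_noise_mx_alt (host : String) : Bool :=
  let h := pvNormHost host
  if h = [] then false
  else
    let candidates :=
      h :: ((List.range h.length).filter (fun i => h[i]? == some '.')).map (fun i => h.drop (i + 1))
    candidates.any (fun c => (pvNoiseSuffixes.map String.toList).contains c)

-- ===== PRECONDITION & SPEC =====
def Spec_is_noise_mx (host : String) (out : Bool) : Prop := out = is_noise_mx_alt host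
instance (host : String) (out : Bool) : Decidable (Spec_is_noise_mx host out) := by unfold Spec_is_noise_mx; infer_instance

-- ===== CLAIM (what is proved, stated in full; the proofs are below) =====
def Claim_equal_is_noise_mx : Prop := ∀ (host : String), Dom_is_noise_mx host → Spec_is_noise_mx host (is_noise_mx host)

-- ===== LEMMAS AND PROOFS =====

-- endswith h ('.'::s) holds iff s is the tail of h after some '.' at index i
theorem endswith_dot_iff (h s : List Char) :
    PySem.Chars.endswith h ('.' :: s) = true ↔
      ∃ i, i < h.length ∧ h[i]? = some '.' ∧ h.drop (i + 1) = s := by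
  rw [PySem.Chars.endswith_iff]
  constructor
  · rintro ⟨t, rfl⟩
    refine ⟨t.length, by simp, ?_, ?_⟩
    · simp
    · simp [List.drop_append]
  · rintro ⟨i, hi, hget, hdrop⟩
    refine ⟨h.take i, ?_⟩
    have hcons : h.drop i = '.' :: h.drop (i + 1) := by
      rw [List.drop_eq_getElem_cons hi]
      simp [List.getElem?_eq_getElem hi] at hget
      simp [hget]
    calc h.take i ++ '.' :: s = h.take i ++ h.drop i := by rw [hcons, hdrop]
      _ = h := List.take_append_drop i h

theorem core_eq (h : List Char) :
    pvNoiseSuffixes.any (fun s => suffix_matches h s.toList)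
      = (h :: ((List.range h.length).filter (fun i => h[i]? == some '.')).map
            (fun i => h.drop (i + 1))).any
          (fun c => (pvNoiseSuffixes.map String.toList).contains c) := by
  rw [Bool.eq_iff_iff]
  simp only [List.any_eq_true, suffix_matches, Bool.or_eq_true, beq_iff_eq,
    endswith_dot_iff, List.any_cons, List.contains_eq_mem, List.mem_map,
    List.mem_filter, List.mem_range, decide_eq_true_eq]
  constructor
  · rintro ⟨s, hs, hcase⟩
    rcases hcase with heq | ⟨i, hi, hget, hdrop⟩
    · exact Or.inl ⟨s, hs, heq.symm⟩
    · exact Or.inr ⟨h.drop (i + 1), ⟨i, ⟨hi, by simp [hget]⟩, rfl⟩, ⟨s, hs, hdrop.symm⟩⟩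
  · rintro (⟨s, hs, heq⟩ | ⟨c, ⟨i, ⟨hi, hget⟩, rfl⟩, ⟨s, hs, hdrop⟩⟩)
    · exact ⟨s, hs, Or.inl heq.symm⟩
    · exact ⟨s, hs, Or.inr ⟨i, hi, by simpa using hget, hdrop.symm⟩⟩

-- ===== VERDICT (by name: the statement is the Claim_ definition above) =====
theorem is_noise_mx_spec : Claim_equal_is_noise_mx := by
  intro host _
  unfold Spec_is_noise_mx is_noise_mx is_noise_mx_alt
  by_cases hempty : pvNormHost host = []
  · simp [hempty]
  · simp only [hempty, if_false]
    exact core_eq (pvNormHost host)
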